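-- pv_equiv track=rewrite | github.com/CristSoft/indexador-de-biblia | pruebas.py | AsignarGrupoID
-- ===== SOURCE A (Python) =====
-- def AsignarGrupoID(libro):
--     grupos = {
--     1: ["GENESIS", "EXODO", "LEVITICO", "NUMEROS", "DEUTERONOMIO"],
--     2: ["JOSUE", "JUECES", "RUT", "1SAMUEL", "2SAMUEL", "1REYES", "2REYES", "1CRONICAS", "2CRONICAS", "ESDRAS", "NEHEMIAS", "ESTER"],
--     3: ["JOB", "SALMOS", "PROVERBIOS", "ECLESIASTES", "CANTARES"],
--     4: ["ISAIAS", "JEREMIAS", "LAMENTACIONES", "EZEQUIEL", "DANIEL"],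
--     5: ["OSEAS", "JOEL", "AMOS", "ABDIAS", "JONAS", "MIQUEAS", "NAHUM", "HABACUC", "SOFONIAS", "AGEO", "ZACARIAS", "MALAQUIAS"],
--     6: ["MATEO", "MARCOS", "LUCAS", "JUAN"],
--     7: ["HECHOS"],
--     8: ["ROMANOS", "1CORINTIOS", "2CORINTIOS", "GALATAS", "EFESIOS", "FILIPENSES", "COLOSENSES", "1TESALONICENSES", "2TESALONICENSES", "1TIMOTEO", "2TIMOTEO", "TITO", "FILEMON"],
--     9: ["HEBREOS", "SANTIAGO", "1PEDRO", "2PEDRO", "1JUAN", "2JUAN", "3JUAN", "JUDAS"],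
--     10: ["APOCALIPSIS"]
--     }
--     for grupo, libros in grupos.items():
--         if libro in libros:
--             return grupo
--     return None
-- ===== SOURCE B (Python) =====
-- # B: flat ordered book list (one .split() literal) + cumulative group boundaries;
-- # position of the book in the canonical order determines the group arithmetically.
-- _LIBROS = ("GENESIS EXODO LEVITICO NUMEROS DEUTERONOMIO "
--            "JOSUE JUECES RUT 1SAMUEL 2SAMUEL 1REYES 2REYES 1CRONICAS 2CRONICAS ESDRAS NEHEMIAS ESTER "
--            "JOB SALMOS PROVERBIOS ECLESIASTES CANTARES "
--            "ISAIAS JEREMIAS LAMENTACIONES EZEQUIEL DANIEL "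
--            "OSEAS JOEL AMOS ABDIAS JONAS MIQUEAS NAHUM HABACUC SOFONIAS AGEO ZACARIAS MALAQUIAS "
--            "MATEO MARCOS LUCAS JUAN "
--            "HECHOS "
--            "ROMANOS 1CORINTIOS 2CORINTIOS GALATAS EFESIOS FILIPENSES COLOSENSES 1TESALONICENSES 2TESALONICENSES 1TIMOTEO 2TIMOTEO TITO FILEMON "
--            "HEBREOS SANTIAGO 1PEDRO 2PEDRO 1JUAN 2JUAN 3JUAN JUDAS "
--            "APOCALIPSIS").split()
--
-- # cumulative end index (exclusive) of each group in _LIBROS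
-- _FIN = [5, 17, 22, 27, 39, 43, 44, 57, 65, 66]
--
-- def AsignarGrupoID(libro):
--     try:
--         i = _LIBROS.index(libro)
--     except ValueError:
--         return None
--     return 1 + sum(1 for fin in _FIN if fin <= i)
-- ===== Notes on version B (the rewrite author's own statement) =====
-- stated objective: alternative
-- what changed: Replaces the loop over groups with per-group membership scans by a single flat canonical book list plus cumulative group boundaries: one .index lookup, and the group id is computed arithmetically from the position (count of boundaries <= index).
import Mathlib
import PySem

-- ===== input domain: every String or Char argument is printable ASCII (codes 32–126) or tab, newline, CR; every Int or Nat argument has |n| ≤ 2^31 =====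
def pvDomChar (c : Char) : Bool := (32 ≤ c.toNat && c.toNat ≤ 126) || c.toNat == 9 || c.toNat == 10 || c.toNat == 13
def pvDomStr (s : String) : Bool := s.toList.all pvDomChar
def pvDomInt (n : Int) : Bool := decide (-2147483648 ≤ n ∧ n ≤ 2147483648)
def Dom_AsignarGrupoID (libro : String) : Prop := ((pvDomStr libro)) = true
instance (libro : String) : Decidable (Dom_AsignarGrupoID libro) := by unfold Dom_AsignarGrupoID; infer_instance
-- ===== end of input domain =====

-- B replaces A's loop over groups (membership scan per group) by one flat canonical book
-- list plus cumulative boundaries: a single index lookup, group id computed arithmetically.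


-- ===== PORT A =====
-- the literal `grupos` table of A (dict id ↦ list of books, insertion order)
def gruposA : List (Int × List String) :=
  [ (1, ["GENESIS", "EXODO", "LEVITICO", "NUMEROS", "DEUTERONOMIO"]),
    (2, ["JOSUE", "JUECES", "RUT", "1SAMUEL", "2SAMUEL", "1REYES", "2REYES", "1CRONICAS", "2CRONICAS", "ESDRAS", "NEHEMIAS", "ESTER"]),
    (3, ["JOB", "SALMOS", "PROVERBIOS", "ECLESIASTES", "CANTARES"]),
    (4, ["ISAIAS", "JEREMIAS", "LAMENTACIONES", "EZEQUIEL", "DANIEL"]),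
    (5, ["OSEAS", "JOEL", "AMOS", "ABDIAS", "JONAS", "MIQUEAS", "NAHUM", "HABACUC", "SOFONIAS", "AGEO", "ZACARIAS", "MALAQUIAS"]),
    (6, ["MATEO", "MARCOS", "LUCAS", "JUAN"]),
    (7, ["HECHOS"]),
    (8, ["ROMANOS", "1CORINTIOS", "2CORINTIOS", "GALATAS", "EFESIOS", "FILIPENSES", "COLOSENSES", "1TESALONICENSES", "2TESALONICENSES", "1TIMOTEO", "2TIMOTEO", "TITO", "FILEMON"]),
    (9, ["HEBREOS", "SANTIAGO", "1PEDRO", "2PEDRO", "1JUAN", "2JUAN", "3JUAN", "JUDAS"]),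
    (10, ["APOCALIPSIS"]) ]

-- the `for grupo, libros in grupos.items(): if libro in libros: return grupo` loop
def loopA (libro : String) : List (Int × List String) → Option Int
  | [] => none
  | (grupo, libros) :: rest => if libro ∈ libros then some grupo else loopA libro rest

def AsignarGrupoID (libro : String) : Option Int := loopA libro gruposA

-- ===== PORT B =====
-- _LIBROS = "...".split()  (one long literal, split on whitespace)
def librosB : List String := PySem.Str.split₀
  ("GENESIS EXODO LEVITICO NUMEROS DEUTERONOMIO JOSUE JUECES RUT 1SAMUEL 2SAMUEL 1REYES 2REYES 1CRONICAS 2CRONICAS ESDRAS NEHEMIAS ESTER JOB SALMOS PROVERBIOS ECLESIASTES CANTARES ISAIAS JEREMIAS LAMENTACIONES EZEQUIEL DANIEL OSEAS JOEL AMOS ABDIAS JONAS MIQUEAS NAHUM HABACUC SOFONIAS AGEO ZACARIAS MALAQUIAS MATEO MARCOS LUCAS JUAN HECHOS ROMANOS 1CORINTIOS 2CORINTIOS GALATAS EFESIOS FILIPENSES COLOSENSES 1TESALONICENSES 2TESALONICENSES 1TIMOTEO 2TIMOTEO TITO FILEMON HEBREOS SANTIAGO 1PEDRO 2PEDRO 1JUAN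 2JUAN 3JUAN JUDAS APOCALIPSIS")

-- _FIN: cumulative end index (exclusive) of each group in _LIBROS
def finB : List Int := [5, 17, 22, 27, 39, 43, 44, 57, 65, 66]

-- try: i = _LIBROS.index(libro) / except ValueError: return None
-- return 1 + sum(1 for fin in _FIN if fin <= i)
def AsignarGrupoID_alt (libro : String) : Option Int :=
  match PySem.List.index? librosB libro with
  | none => none
  | some i => some (1 + ((finB.filter (fun fin => fin ≤ (i : Int))).length : Int))

-- ===== PRECONDITION & SPEC =====
def Spec_AsignarGrupoID (libro : String) (out : Option Int) : Prop := out = AsignarGrupoID_alt libro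
instance (libro : String) (out : Option Int) : Decidable (Spec_AsignarGrupoID libro out) := by unfold Spec_AsignarGrupoID; infer_instance

-- ===== CLAIM (what is proved, stated in full; the proofs are below) =====
def Claim_equal_AsignarGrupoID : Prop := ∀ (libro : String), Dom_AsignarGrupoID libro → Spec_AsignarGrupoID libro (AsignarGrupoID libro)

-- ===== LEMMAS AND PROOFS =====

-- group id of the book at flat position i, read off A's table
def grp : List (Int × List String) → Nat → Int
  | [], _ => 0
  | (g, ls) :: rest, i => if i < ls.length then g else grp rest (i - ls.length)

set_option maxRecDepth 100000 in
set_option maxHeartbeats 1000000 in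
theorem flat_eq : gruposA.flatMap (fun p => p.2) = librosB := by decide

set_option maxRecDepth 100000 in
set_option maxHeartbeats 1000000 in
theorem librosB_len : librosB.length = 66 := by decide

theorem index?_append (ls t : List String) (v : String) :
    PySem.List.index? (ls ++ t) v =
      if v ∈ ls then PySem.List.index? ls v
      else (PySem.List.index? t v).map (· + ls.length) := by
  induction ls with
  | nil => simp
  | cons x ls ih =>
    by_cases hx : x = v
    · subst hx
      rw [List.cons_append, PySem.List.index?_cons_self,
        if_pos (List.mem_cons_self ..), PySem.List.index?_cons_self]
    · rw [List.cons_append, PySem.List.index?_cons_of_ne _ hx, ih,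
        PySem.List.index?_cons_of_ne _ hx]
      by_cases hm : v ∈ ls
      · rw [if_pos hm, if_pos (List.mem_cons_of_mem _ hm)]
      · rw [if_neg hm, if_neg (by
            simp only [List.mem_cons, hm, or_false]
            exact fun h => hx h.symm), Option.map_map]
        cases hopt : PySem.List.index? t v with
        | none => rfl
        | some i =>
          simp only [Option.map_some, Function.comp, List.length_cons]
          refine congrArg some ?_
          omega

theorem loopA_eq_grp (libro : String) (gs : List (Int × List String)) :
    loopA libro gs =
      (PySem.List.index? (gs.flatMap (fun p => p.2)) libro).map (grp gs) := by
  induction gs with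
  | nil => rfl
  | cons p rest ih =>
    obtain ⟨g, ls⟩ := p
    rw [List.flatMap_cons, index?_append]
    by_cases hm : libro ∈ ls
    · obtain ⟨j, hj⟩ := Option.isSome_iff_exists.mp
        ((PySem.List.index?_isSome_iff ls libro).mpr hm)
      obtain ⟨hjl, -, -⟩ := PySem.List.getElem_of_index?_eq_some hj
      rw [loopA, if_pos hm, if_pos hm, hj]
      simp only [Option.map_some, grp, if_pos hjl]
    · rw [loopA, if_neg hm, if_neg hm, ih, Option.map_map]
      cases PySem.List.index? (rest.flatMap (fun p => p.2)) libro with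
      | none => rfl
      | some i =>
        simp only [Option.map_some, Function.comp, grp]
        rw [if_neg (by omega)]
        congr 2
        omega

set_option maxRecDepth 100000 in
set_option maxHeartbeats 1000000 in
theorem grp_count_b : (List.range 66).all
    (fun i => grp gruposA i == 1 + ((finB.filter (fun fin => fin ≤ (i : Int))).length : Int)) = true := by
  decide

theorem grp_eq_count : ∀ i : Nat, i < 66 →
    grp gruposA i = 1 + ((finB.filter (fun fin => fin ≤ (i : Int))).length : Int) := by
  intro i hi
  exact beq_iff_eq.mp ((List.all_eq_true.mp grp_count_b) i (List.mem_range.mpr hi))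

-- ===== VERDICT (by name: the statement is the Claim_ definition above) =====
theorem AsignarGrupoID_spec : Claim_equal_AsignarGrupoID := by
  intro libro _
  show AsignarGrupoID libro = AsignarGrupoID_alt libro
  rw [AsignarGrupoID, loopA_eq_grp, flat_eq]
  unfold AsignarGrupoID_alt
  cases hidx : PySem.List.index? librosB libro with
  | none => rfl
  | some i =>
    obtain ⟨hi, _, _⟩ := PySem.List.getElem_of_index?_eq_some hidx
    simp only [Option.map_some]
    rw [grp_eq_count i (by rw [librosB_len] at hi; omega)]
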